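-- pv_equiv track=rewrite | github.com/CleanYANG/Hide-Seek-cemiR | hide_seek_cemir.py | classify_site
-- ===== SOURCE A (Python) =====
-- def classify_site(start, length, mask):
--     """
--     对一个 seed site 按可及性分类。
--     输入:
--       start : 1-based 起始位置
--       length: motif 长度
--       mask  : 对应 RNA 的 mask[0..n], 1=unpaired, 0=paired
--
--     返回:
--       1 = 全不配对（窗口内全是 1）
--       2 = 部分不配对（至少一个 1，但不全是 1）
--       3 = 全配对（全是 0 或越界视为 0）
--     """
--     positions = range(start, start + length)
--     vals = []
--     for i in positions:
--         if 0 <= i < len(mask):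
--             vals.append(mask[i])
--         else:
--             vals.append(0)
--
--     if all(v == 1 for v in vals):
--         return 1
--     elif any(v == 1 for v in vals):
--         return 2
--     else:
--         return 3
-- ===== SOURCE B (Python) =====
-- def classify_site(start, length, mask):
--     # Divide and conquer: a single position is 1 (unpaired) or 3 (paired /
--     # out of range); a longer window is split in half and the two verdicts are
--     # joined: equal verdicts propagate, differing verdicts give 2 (partial).
--     if length <= 0:
--         return 1
--     if length == 1:
--         return 1 if 0 <= start < len(mask) and mask[start] == 1 else 3
--     half = length // 2
--     left = classify_site(start, half, mask)
--     right = classify_site(start + half, length - half, mask)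
--     return left if left == right else 2
-- ===== Notes on version B (the rewrite author's own statement) =====
-- stated objective: alternative
-- what changed: Replaces building a vals list and scanning it twice with all()/any() by divide-and-conquer on the window: a single position yields verdict 1 or 3, longer windows are split in half and the two verdicts are joined (equal verdicts propagate, differing verdicts give 2), keeping no list and no counter.
import Mathlib
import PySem

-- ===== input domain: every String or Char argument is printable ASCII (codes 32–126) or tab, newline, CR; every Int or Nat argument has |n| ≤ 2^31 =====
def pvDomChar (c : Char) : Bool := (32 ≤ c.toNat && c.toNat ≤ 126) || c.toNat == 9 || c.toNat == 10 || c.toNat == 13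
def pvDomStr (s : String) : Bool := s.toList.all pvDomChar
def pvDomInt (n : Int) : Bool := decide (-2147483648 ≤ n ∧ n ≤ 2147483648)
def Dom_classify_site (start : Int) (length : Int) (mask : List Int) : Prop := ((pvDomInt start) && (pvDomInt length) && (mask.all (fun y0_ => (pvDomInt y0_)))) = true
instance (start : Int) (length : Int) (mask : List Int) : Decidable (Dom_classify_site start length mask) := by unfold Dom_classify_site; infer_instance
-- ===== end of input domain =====

-- B replaces A's vals-list plus all()/any() scans by divide-and-conquer on the
-- window, joining the two halves' verdicts; objective: alternative.

-- ===== PORT A =====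
-- literal port of A: build vals (out-of-range positions contribute 0), then all()/any().
-- mask[i] is guarded by 0 <= i < len(mask), so pyGetD is exact here (never hits the default).
def classify_site (start : Int) (length : Int) (mask : List Int) : Int :=
  let positions := PySem.List.pyRange start (start + length) 1
  let vals := positions.foldl
    (fun acc i =>
      if 0 ≤ i ∧ i < (mask.length : Int) then acc ++ [PySem.List.pyGetD mask i 0]
      else acc ++ [0]) []
  if vals.all (fun v => v == 1) then 1
  else if vals.any (fun v => v == 1) then 2
  else 3

-- ===== PORT B =====
-- literal port of Source B: divide and conquer on the window, joining the two halves' verdicts.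
def classify_site_alt (start : Int) (length : Int) (mask : List Int) : Int :=
  if _h : length ≤ 0 then 1
  else if h2 : length == 1 then
    (if 0 ≤ start ∧ start < (mask.length : Int) ∧ PySem.List.pyGetD mask start 0 == 1
     then 1 else 3)
  else
    let half := PySem.Int.floordiv length 2
    let left := classify_site_alt start half mask
    let right := classify_site_alt (start + half) (length - half) mask
    if left == right then left else 2
termination_by length.toNat
decreasing_by
  all_goals
    rw [PySem.Int.floordiv_eq_ediv_of_pos (by omega : (0:Int) < 2)]
    rw [beq_iff_eq] at h2
    omega

-- ===== PRECONDITION & SPEC =====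
def Spec_classify_site (start : Int) (length : Int) (mask : List Int) (out : Int) : Prop := out = classify_site_alt start length mask
instance (start : Int) (length : Int) (mask : List Int) (out : Int) : Decidable (Spec_classify_site start length mask out) := by unfold Spec_classify_site; infer_instance

-- ===== CLAIM (what is proved, stated in full; the proofs are below) =====
def Claim_equal_classify_site : Prop := ∀ (start : Int) (length : Int) (mask : List Int), Dom_classify_site start length mask → Spec_classify_site start length mask (classify_site start length mask)

-- ===== LEMMAS AND PROOFS =====

-- the value A appends for position i
def pvF (mask : List Int) (i : Int) : Int :=
  if 0 ≤ i ∧ i < (mask.length : Int) then PySem.List.pyGetD mask i 0 else 0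

-- A's final classification of a list of window values
def pvRA (vals : List Int) : Int :=
  if vals.all (fun v => v == 1) then 1
  else if vals.any (fun v => v == 1) then 2
  else 3

theorem pvA_fold (mask : List Int) (ps : List Int) (acc : List Int) :
    ps.foldl (fun acc i =>
      if 0 ≤ i ∧ i < (mask.length : Int) then acc ++ [PySem.List.pyGetD mask i 0]
      else acc ++ [0]) acc = acc ++ ps.map (pvF mask) := by
  induction ps generalizing acc with
  | nil => simp
  | cons x xs ih =>
    simp only [List.foldl_cons, List.map_cons]
    rw [ih]
    unfold pvF
    split_ifs <;> simp

-- joining: pvRA of a concatenation of two nonempty halves is the join of their verdicts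
theorem pvRA_append (u w : List Int) (hu : u ≠ []) (hw : w ≠ []) :
    pvRA (u ++ w) = (if pvRA u == pvRA w then pvRA u else 2) := by
  obtain ⟨a, ha⟩ := List.exists_mem_of_ne_nil u hu
  obtain ⟨b, hb⟩ := List.exists_mem_of_ne_nil w hw
  unfold pvRA
  by_cases hallu : (u.all (fun v => v == 1)) = true <;>
  by_cases hanyu : (u.any (fun v => v == 1)) = true <;>
  by_cases hallw : (w.all (fun v => v == 1)) = true <;>
  by_cases hanyw : (w.any (fun v => v == 1)) = true
  all_goals
    first
    | (exact absurd (List.any_eq_true.mpr ⟨a, ha, List.all_eq_true.mp hallu a ha⟩) hanyu)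
    | (exact absurd (List.any_eq_true.mpr ⟨b, hb, List.all_eq_true.mp hallw b hb⟩) hanyw)
    | (simp [List.all_append, List.any_append, hallu, hanyu, hallw, hanyw])

-- B computes pvRA of A's window values: strong induction on the window length
theorem pvB_eq_pvRA (mask : List Int) : ∀ (l : Nat) (start : Int),
    classify_site_alt start (l : Int) mask
      = pvRA ((PySem.List.pyRange start (start + (l : Int)) 1).map (pvF mask)) := by
  intro l
  induction l using Nat.strong_induction_on with
  | _ l ih =>
    intro start
    match l with
    | 0 =>
      rw [classify_site_alt]
      simp [PySem.List.pyRange_one_eq_nil, pvRA]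
    | 1 =>
      rw [classify_site_alt]
      norm_num
      unfold pvRA pvF
      by_cases h1 : 0 ≤ start ∧ start < (mask.length : Int)
      · by_cases h2 : PySem.List.pyGetD mask start 0 = 1 <;>
          simp [h1.1, h1.2, h2]
      · have h2 : ¬ (0 ≤ start ∧ start < (mask.length : Int) ∧
            PySem.List.pyGetD mask start 0 = 1) := by tauto
        simp [h1, h2]
    | (m+2) =>
      rw [classify_site_alt]
      have h0 : ¬ ((m + 2 : Nat) : Int) ≤ 0 := by push_cast; omega
      have h1 : (((m + 2 : Nat) : Int) == 1) = false := by simp; omega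
      have hhalf : PySem.Int.floordiv ((m + 2 : Nat) : Int) 2 = (((m + 2) / 2 : Nat) : Int) :=
        PySem.Int.floordiv_natCast (m + 2) 2
      have hb1 : 1 ≤ (m + 2) / 2 := by omega
      have hb2 : (m + 2) / 2 < m + 2 := by omega
      simp only [h0, dite_false, h1, Bool.false_eq_true, hhalf]
      have hrest : ((m + 2 : Nat) : Int) - (((m + 2) / 2 : Nat) : Int)
          = (((m + 2) - (m + 2) / 2 : Nat) : Int) := by push_cast; omega
      rw [hrest, ih ((m + 2) / 2) hb2 start,
          ih ((m + 2) - (m + 2) / 2) (by omega) (start + (((m + 2) / 2 : Nat) : Int))]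
      have harg : start + (((m + 2) / 2 : Nat) : Int) + (((m + 2) - (m + 2) / 2 : Nat) : Int)
          = start + ((m + 2 : Nat) : Int) := by push_cast; omega
      rw [harg]
      rw [PySem.List.pyRange_one_append start (start + (((m + 2) / 2 : Nat) : Int))
            (start + ((m + 2 : Nat) : Int)) (by omega) (by push_cast; omega),
          List.map_append]
      rw [pvRA_append]
      · intro hnil
        have hl := congrArg List.length hnil
        simp [PySem.List.length_pyRange_one] at hl
        omega
      · intro hnil
        have hl := congrArg List.length hnil
        simp [PySem.List.length_pyRange_one] at hl
        omega

theorem classify_site_spec_aux (start length : Int) (mask : List Int) :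
    classify_site start length mask = classify_site_alt start length mask := by
  unfold classify_site
  simp only
  rw [pvA_fold]
  simp only [List.nil_append]
  by_cases h : length ≤ 0
  · rw [classify_site_alt]
    simp [h, PySem.List.pyRange_one_eq_nil (by omega : start + length ≤ start)]
  · have hl : length = ((length.toNat : Nat) : Int) := by omega
    rw [hl, pvB_eq_pvRA]
    rfl

-- ===== VERDICT (by name: the statement is the Claim_ definition above) =====
theorem classify_site_spec : Claim_equal_classify_site := by
  intro start length mask _
  unfold Spec_classify_site
  exact classify_site_spec_aux start length mask
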